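-- pv_equiv track=rewrite | github.com/theextraordinary/VASP | finetune/data/generate_image_anim_design_examples.py | _pick_highlight_word
-- ===== SOURCE A (Python) =====
-- STOPWORDS = {
--     "a",
--     "an",
--     "the",
--     "is",
--     "are",
--     "was",
--     "were",
--     "in",
--     "on",
--     "at",
--     "to",
--     "of",
--     "and",
--     "with",
--     "for",
--     "this",
--     "that",
--     "there",
--     "it",
--     "as",
--     "by",
--     "from",
--     "into",
--     "over",
--     "under",
--     "near",
-- }
--
-- def _tokenize(text: str) -> list[str]:
--     # Keep punctuation attached for sentence-boundary aware grouping.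
--     return text.split()
--
-- def _pick_highlight_word(text: str) -> str:
--     words = [w.strip(".,!?;:()[]{}\"'").lower() for w in _tokenize(text)]
--     for w in words:
--         if len(w) >= 5 and w not in STOPWORDS:
--             return w
--     for w in words:
--         if w and w not in STOPWORDS:
--             return w
--     return "focus"
-- ===== SOURCE B (Python) =====
-- STOPWORDS = {
--     "a", "an", "the", "is", "are", "was", "were", "in", "on", "at", "to",
--     "of", "and", "with", "for", "this", "that", "there", "it", "as", "by",
--     "from", "into", "over", "under", "near",
-- }
--
--
-- def _pick_highlight_word(text: str) -> str:
--     # Single pass: return the first long non-stopword immediately; remember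
--     # the first short usable word as a fallback.
--     fallback = None
--     for raw in text.split():
--         w = raw.strip(".,!?;:()[]{}\"'").lower()
--         if len(w) >= 5 and w not in STOPWORDS:
--             return w
--         if w and w not in STOPWORDS and fallback is None:
--             fallback = w
--     return fallback if fallback is not None else "focus"
-- ===== Notes on version B (the rewrite author's own statement) =====
-- stated objective: simpler
-- what changed: Replaced the build-a-normalized-list-then-two-sequential-scans structure by one pass over the raw tokens that normalizes each token inline, returns a long non-stopword immediately and maintains a single first-fallback accumulator.
import Mathlib
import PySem

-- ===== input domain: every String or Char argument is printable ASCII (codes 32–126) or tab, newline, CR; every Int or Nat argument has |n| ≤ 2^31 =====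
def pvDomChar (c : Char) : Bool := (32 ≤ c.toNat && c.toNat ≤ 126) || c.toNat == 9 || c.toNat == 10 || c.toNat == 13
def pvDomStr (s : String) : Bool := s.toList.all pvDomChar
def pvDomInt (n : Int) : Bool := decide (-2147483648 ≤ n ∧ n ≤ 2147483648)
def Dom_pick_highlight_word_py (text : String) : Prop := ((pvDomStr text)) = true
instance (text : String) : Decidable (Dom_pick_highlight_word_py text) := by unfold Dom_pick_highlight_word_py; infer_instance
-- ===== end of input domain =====

-- B replaces A's normalized-list-plus-two-scans by a single inline-normalizing pass with a first-fallback accumulator (objective: simpler).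

-- ===== PORT A =====
def pvStop : List String :=
  ["a", "an", "the", "is", "are", "was", "were", "in", "on", "at", "to",
   "of", "and", "with", "for", "this", "that", "there", "it", "as", "by",
   "from", "into", "over", "under", "near"]

def pvNorm (w : String) : String :=
  PySem.Str.lower (PySem.Str.stripChars w ".,!?;:()[]{}\"'")

-- first loop of A: first word with len >= 5 not in STOPWORDS (early return)
def pvLoop1 : List String → Option String
  | [] => none
  | w :: ws => if 5 ≤ PySem.Str.len w ∧ w ∉ pvStop then some w else pvLoop1 ws

-- second loop of A: first non-empty word not in STOPWORDS (early return)
def pvLoop2 : List String → Option String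
  | [] => none
  | w :: ws => if w ≠ "" ∧ w ∉ pvStop then some w else pvLoop2 ws

def pick_highlight_word_py (text : String) : String :=
  let words := (PySem.Str.split₀ text).map pvNorm
  match pvLoop1 words with
  | some w => w
  | none =>
    match pvLoop2 words with
    | some w => w
    | none => "focus"

-- ===== PORT B =====
-- single pass over the raw tokens, normalizing inline, with a fallback accumulator
def pvScan : List String → Option String → String
  | [], fb => fb.getD "focus"
  | raw :: rest, fb =>
    let w := PySem.Str.lower (PySem.Str.stripChars raw ".,!?;:()[]{}\"'")
    if 5 ≤ PySem.Str.len w ∧ w ∉ pvStop then w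
    else pvScan rest (if w ≠ "" ∧ w ∉ pvStop ∧ fb = none then some w else fb)

def pick_highlight_word_py_alt (text : String) : String :=
  pvScan (PySem.Str.split₀ text) none

-- ===== PRECONDITION & SPEC =====
def Spec_pick_highlight_word_py (text : String) (out : String) : Prop := out = pick_highlight_word_py_alt text
instance (text : String) (out : String) : Decidable (Spec_pick_highlight_word_py text out) := by unfold Spec_pick_highlight_word_py; infer_instance

-- ===== CLAIM (what is proved, stated in full; the proofs are below) =====
def Claim_equal_pick_highlight_word_py : Prop := ∀ (text : String), Dom_pick_highlight_word_py text → Spec_pick_highlight_word_py text (pick_highlight_word_py text)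

-- ===== LEMMAS AND PROOFS =====
-- Loop invariant: the single pass equals "first long hit, else the recorded fallback, else A's second scan".
theorem pvScan_eq (raws : List String) (fb : Option String) :
    pvScan raws fb =
      match pvLoop1 (raws.map pvNorm) with
      | some w => w
      | none =>
        match fb with
        | some v => v
        | none =>
          match pvLoop2 (raws.map pvNorm) with
          | some w => w
          | none => "focus" := by
  induction raws generalizing fb with
  | nil =>
    cases fb <;> simp [pvScan, pvLoop1, pvLoop2, Option.getD]
  | cons raw rest ih =>
    simp only [List.map_cons, pvScan, pvLoop1, pvLoop2, pvNorm]
    by_cases h1 : 5 ≤ PySem.Str.len (PySem.Str.lower (PySem.Str.stripChars raw ".,!?;:()[]{}\"'"))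
        ∧ (PySem.Str.lower (PySem.Str.stripChars raw ".,!?;:()[]{}\"'")) ∉ pvStop
    · rw [if_pos h1, if_pos h1]
    · rw [if_neg h1, if_neg h1, ih]
      cases fb with
      | some v => simp
      | none =>
        by_cases h2 : (PySem.Str.lower (PySem.Str.stripChars raw ".,!?;:()[]{}\"'")) ≠ ""
            ∧ (PySem.Str.lower (PySem.Str.stripChars raw ".,!?;:()[]{}\"'")) ∉ pvStop
        · rw [if_pos ⟨h2.1, h2.2, rfl⟩, if_pos h2]
        · rw [if_neg (fun h => h2 ⟨h.1, h.2.1⟩), if_neg h2]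

-- ===== VERDICT (by name: the statement is the Claim_ definition above) =====
theorem pick_highlight_word_py_spec : Claim_equal_pick_highlight_word_py := by
  intro text _
  unfold Spec_pick_highlight_word_py pick_highlight_word_py pick_highlight_word_py_alt
  rw [pvScan_eq]
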